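-- pv_equiv track=rewrite | github.com/6666-H/Qx-Resource | Sync/Rewrite_Ad.py | _detect_section
-- ===== SOURCE A (Python) =====
-- def _detect_section(line: str) -> str:
--     """检测规则所属段落"""
--     line_lower = line.lower()
--
--     section_markers = {
--         'general': ['[general]'],
--         'rule': ['[rule]'],
--         'rewrite': ['[rewrite]', '[rewrite_local]'],
--         'url_rewrite': ['[url rewrite]', '[url_rewrite]'],
--         'header_rewrite': ['[header rewrite]', '[header_rewrite]'],
--         'script': ['[script]'],
--         'mitm': ['[mitm]'],
--         'panel': ['[panel]'],
--         'map_local': ['[map local]', '[map_local]'],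
--         'filter': ['[filter]'],
--         'dns': ['[dns]'],
--         'policy': ['[policy]']
--     }
--
--     for section, markers in section_markers.items():
--         if any(line_lower.startswith(marker) for marker in markers):
--             return section
--     return None
-- ===== SOURCE B (Python) =====
-- _SECTION_TABLE = {
--     '[general]': 'general',
--     '[rule]': 'rule',
--     '[rewrite]': 'rewrite',
--     '[rewrite_local]': 'rewrite',
--     '[url rewrite]': 'url_rewrite',
--     '[url_rewrite]': 'url_rewrite',
--     '[header rewrite]': 'header_rewrite',
--     '[header_rewrite]': 'header_rewrite',
--     '[script]': 'script',
--     '[mitm]': 'mitm',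
--     '[panel]': 'panel',
--     '[map local]': 'map_local',
--     '[map_local]': 'map_local',
--     '[filter]': 'filter',
--     '[dns]': 'dns',
--     '[policy]': 'policy',
-- }
--
--
-- def _detect_section(line: str) -> str:
--     """检测规则所属段落"""
--     line_lower = line.lower()
--     if not line_lower.startswith('['):
--         return None
--     end = line_lower.find(']')
--     if end == -1:
--         return None
--     return _SECTION_TABLE.get(line_lower[:end + 1])
-- ===== Notes on version B (the rewrite author's own statement) =====
-- stated objective: idiomatic
-- what changed: Replaces the per-section loop of startswith tests with parse-then-lookup: slice out the bracketed token through the first closing bracket and look it up once in a flat marker-to-section dict.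
import Mathlib
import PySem

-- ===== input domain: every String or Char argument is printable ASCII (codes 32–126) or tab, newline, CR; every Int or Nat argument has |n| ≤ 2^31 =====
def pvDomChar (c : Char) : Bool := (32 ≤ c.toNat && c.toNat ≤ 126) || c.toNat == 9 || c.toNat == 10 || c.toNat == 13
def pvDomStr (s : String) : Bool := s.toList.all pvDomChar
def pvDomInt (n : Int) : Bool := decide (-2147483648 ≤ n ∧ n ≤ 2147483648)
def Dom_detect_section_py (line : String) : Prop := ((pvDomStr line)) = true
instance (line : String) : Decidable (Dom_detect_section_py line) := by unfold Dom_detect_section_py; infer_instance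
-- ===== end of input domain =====

-- B replaces A's loop of per-section startswith tests by extracting the bracketed token up to
-- the first ']' and looking it up once in a flat marker->section association table (idiomatic).

-- ===== PORT A =====
-- the section_markers dict of A, in insertion order
def pvSectionMarkers : List (String × List String) :=
  [("general", ["[general]"]), ("rule", ["[rule]"]),
   ("rewrite", ["[rewrite]", "[rewrite_local]"]),
   ("url_rewrite", ["[url rewrite]", "[url_rewrite]"]),
   ("header_rewrite", ["[header rewrite]", "[header_rewrite]"]),
   ("script", ["[script]"]), ("mitm", ["[mitm]"]), ("panel", ["[panel]"]),
   ("map_local", ["[map local]", "[map_local]"]),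
   ("filter", ["[filter]"]), ("dns", ["[dns]"]), ("policy", ["[policy]"])]

-- A's 'for section, markers in ...: if any(line_lower.startswith(marker) ...): return section' loop
def pvScan (ll : String) : List (String × List String) -> Option String
  | [] => none
  | (sec, ms) :: rest =>
      if ms.any (fun m => PySem.Str.startswith ll m) then some sec else pvScan ll rest

def detect_section_py (line : String) : Option String :=
  pvScan (PySem.Str.lower line) pvSectionMarkers

-- ===== PORT B =====
-- Source B's flat _SECTION_TABLE: marker -> section
def pvSectionTable : PySem.Dict String String :=
  PySem.Dict.ofList
    [("[general]", "general"), ("[rule]", "rule"),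
     ("[rewrite]", "rewrite"), ("[rewrite_local]", "rewrite"),
     ("[url rewrite]", "url_rewrite"), ("[url_rewrite]", "url_rewrite"),
     ("[header rewrite]", "header_rewrite"), ("[header_rewrite]", "header_rewrite"),
     ("[script]", "script"), ("[mitm]", "mitm"), ("[panel]", "panel"),
     ("[map local]", "map_local"), ("[map_local]", "map_local"),
     ("[filter]", "filter"), ("[dns]", "dns"), ("[policy]", "policy")]

def detect_section_py_alt (line : String) : Option String :=
  let ll := PySem.Str.lower line
  if PySem.Str.startswith ll "[" then
    let e := PySem.Str.find ll "]"
    if e = -1 then none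
    else PySem.Dict.get? pvSectionTable (PySem.Str.slice ll none (some (e + 1)))
  else none

-- ===== PRECONDITION & SPEC =====
def Spec_detect_section_py (line : String) (out : Option String) : Prop := out = detect_section_py_alt line
instance (line : String) (out : Option String) : Decidable (Spec_detect_section_py line out) := by unfold Spec_detect_section_py; infer_instance

-- ===== CLAIM (what is proved, stated in full; the proofs are below) =====
def Claim_equal_detect_section_py : Prop := ∀ (line : String), Dom_detect_section_py line -> Spec_detect_section_py line (detect_section_py line)

-- ===== LEMMAS AND PROOFS =====

theorem single_prefix_drop (L : List Char) (k : Nat) (c : Char) :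
    [c] <+: L.drop k ↔ L[k]? = some c := by
  constructor
  · rintro ⟨l', h⟩
    have h2 : (L.drop k).head? = L[k]? := List.head?_drop ..
    rw [← h] at h2; simpa using h2.symm
  · intro h
    have h2 : (L.drop k).head? = L[k]? := List.head?_drop ..
    rw [h] at h2
    rcases hd : L.drop k with _ | ⟨a, t⟩
    · rw [hd] at h2; simp at h2
    · rw [hd] at h2; simp at h2; exact ⟨t, by simp [h2]⟩

theorem sw_iff_token (L : List Char) (i : Nat)
    (hi : [']'] <+: L.drop i) (hmin : ∀ j < i, ¬ [']'] <+: L.drop j)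
    (mb : List Char) (hmb : ']' ∉ mb) :
    (mb ++ [']']) <+: L ↔ L.take (i + 1) = mb ++ [']'] := by
  rw [single_prefix_drop] at hi
  constructor
  · rintro ⟨rest, hL⟩
    have hat : L[mb.length]? = some ']' := by rw [← hL]; simp
    have hbefore : ∀ j < mb.length, L[j]? ≠ some ']' := by
      intro j hj hc
      rw [← hL] at hc
      rw [show (mb ++ [']'] ++ rest)[j]? = mb[j]? by simp [List.getElem?_append, hj]] at hc
      exact hmb (List.mem_of_getElem? hc)
    have hieq : i = mb.length := by
      by_contra hne
      rcases Nat.lt_or_ge i mb.length with hlt | hge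
      · exact hbefore i hlt hi
      · have : mb.length < i := lt_of_le_of_ne hge (fun e => hne e.symm)
        exact hmin mb.length this ((single_prefix_drop ..).mpr hat)
    rw [hieq, ← hL]
    simp [List.take_append]
  · intro h
    have : L.take (i + 1) <+: L := List.take_prefix _ _
    rwa [h] at this

theorem sw_false_no_bracket (s : String) (h : PySem.Str.startswith s "[" = false)
    (m : String) (hm : PySem.Str.startswith m "[" = true) :
    PySem.Str.startswith s m = false := by
  by_contra hc
  rw [Bool.not_eq_false] at hc
  have hms : m.toList <+: s.toList := by simpa [PySem.Chars.startswith_iff] using hc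
  have hbm : "[".toList <+: m.toList := by simpa [PySem.Chars.startswith_iff] using hm
  have : PySem.Str.startswith s "[" = true := by
    simp only [PySem.Str.startswith_eq, PySem.Chars.startswith_iff]
    exact hbm.trans hms
  rw [this] at h; exact Bool.true_eq_false.mp h

theorem sw_false_no_rbracket (s : String) (h : PySem.Str.find s "]" = -1)
    (m : String) (hm : PySem.Str.isIn "]" m = true) :
    PySem.Str.startswith s m = false := by
  by_contra hc
  rw [Bool.not_eq_false] at hc
  have hms : m.toList <+: s.toList := by simpa [PySem.Chars.startswith_iff] using hc
  have hin : "]".toList <:+: m.toList := (PySem.Str.isIn_iff_infix _ _).mp hm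
  have : ¬ "]".toList <:+: s.toList := (PySem.Str.find_eq_neg_one_iff _ _).mp h
  exact this (hin.trans hms.isInfix)

theorem sw_eq_token (s : String) (i : Nat)
    (hje : [']'] <+: s.toList.drop i) (hmin : ∀ j < i, ¬ [']'] <+: s.toList.drop j)
    (m : String) (mb : List Char) (hm : m.toList = mb ++ [']']) (hmb : ']' ∉ mb) :
    PySem.Str.startswith s m = decide (s.toList.take (i + 1) = m.toList) := by
  have h := sw_iff_token s.toList i hje hmin mb hmb
  rw [← hm] at h
  rw [Bool.eq_iff_iff]
  simp only [PySem.Str.startswith_eq, PySem.Chars.startswith_iff, decide_eq_true_eq]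
  exact h

theorem tok_beq (t k : String) : (k == t) = decide (t.toList = k.toList) := by
  by_cases h : t.toList = k.toList
  · have hk : k = t := (String.toList_inj.mp h).symm
    subst hk; simp
  · have hne : k ≠ t := fun e => h (by rw [e])
    simp [hne, h]

theorem core (s : String) :
    pvScan s pvSectionMarkers =
      (if PySem.Str.startswith s "[" then
        (if PySem.Str.find s "]" = -1 then none
         else PySem.Dict.get? pvSectionTable (PySem.Str.slice s none (some (PySem.Str.find s "]" + 1))))
       else none) := by
  by_cases h1 : PySem.Str.startswith s "[" = true
  · rw [if_pos h1]
    by_cases h2 : PySem.Str.find s "]" = -1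
    · rw [if_pos h2]
      simp only [pvScan, pvSectionMarkers, List.any_cons, List.any_nil,
        sw_false_no_rbracket s h2 "[general]" (by decide),
        sw_false_no_rbracket s h2 "[rule]" (by decide),
        sw_false_no_rbracket s h2 "[rewrite]" (by decide),
        sw_false_no_rbracket s h2 "[rewrite_local]" (by decide),
        sw_false_no_rbracket s h2 "[url rewrite]" (by decide),
        sw_false_no_rbracket s h2 "[url_rewrite]" (by decide),
        sw_false_no_rbracket s h2 "[header rewrite]" (by decide),
        sw_false_no_rbracket s h2 "[header_rewrite]" (by decide),
        sw_false_no_rbracket s h2 "[script]" (by decide),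
        sw_false_no_rbracket s h2 "[mitm]" (by decide),
        sw_false_no_rbracket s h2 "[panel]" (by decide),
        sw_false_no_rbracket s h2 "[map local]" (by decide),
        sw_false_no_rbracket s h2 "[map_local]" (by decide),
        sw_false_no_rbracket s h2 "[filter]" (by decide),
        sw_false_no_rbracket s h2 "[dns]" (by decide),
        sw_false_no_rbracket s h2 "[policy]" (by decide),
        ]
      simp
    · rw [if_neg h2]
      have h0 : 0 ≤ PySem.Str.find s "]" := by
        have := PySem.Chars.neg_one_le_find s.toList "]".toList
        rw [PySem.Str.find_eq]
        rw [PySem.Str.find_eq] at h2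
        omega
      set e := PySem.Str.find s "]" with he
      set i := e.toNat with hi
      have hfc : PySem.Chars.find s.toList "]".toList = e := (PySem.Str.find_eq s "]").symm
      have h0c : 0 ≤ PySem.Chars.find s.toList "]".toList := by rw [hfc]; exact h0
      obtain ⟨hje', hmin'⟩ := PySem.Chars.find_spec h0c
      rw [hfc] at hje' hmin'
      have hje : [']'] <+: s.toList.drop i := hje'
      have hmin : ∀ j < i, ¬ [']'] <+: s.toList.drop j := hmin'
      have tokeq : (PySem.Str.slice s none (some (e + 1))).toList = s.toList.take (i + 1) := by
        have h0e : (0 : ℤ) ≤ e + 1 := by omega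
        rw [PySem.Str.toList_slice, PySem.Chars.slice_eq_listSlice,
            PySem.List.slice_to s.toList h0e]
        congr 1
        omega
      simp only [pvScan, pvSectionMarkers, List.any_cons, List.any_nil, Bool.or_false,
        sw_eq_token s i hje hmin "[general]" "[general".toList (by decide) (by decide),
        sw_eq_token s i hje hmin "[rule]" "[rule".toList (by decide) (by decide),
        sw_eq_token s i hje hmin "[rewrite]" "[rewrite".toList (by decide) (by decide),
        sw_eq_token s i hje hmin "[rewrite_local]" "[rewrite_local".toList (by decide) (by decide),
        sw_eq_token s i hje hmin "[url rewrite]" "[url rewrite".toList (by decide) (by decide),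
        sw_eq_token s i hje hmin "[url_rewrite]" "[url_rewrite".toList (by decide) (by decide),
        sw_eq_token s i hje hmin "[header rewrite]" "[header rewrite".toList (by decide) (by decide),
        sw_eq_token s i hje hmin "[header_rewrite]" "[header_rewrite".toList (by decide) (by decide),
        sw_eq_token s i hje hmin "[script]" "[script".toList (by decide) (by decide),
        sw_eq_token s i hje hmin "[mitm]" "[mitm".toList (by decide) (by decide),
        sw_eq_token s i hje hmin "[panel]" "[panel".toList (by decide) (by decide),
        sw_eq_token s i hje hmin "[map local]" "[map local".toList (by decide) (by decide),
        sw_eq_token s i hje hmin "[map_local]" "[map_local".toList (by decide) (by decide),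
        sw_eq_token s i hje hmin "[filter]" "[filter".toList (by decide) (by decide),
        sw_eq_token s i hje hmin "[dns]" "[dns".toList (by decide) (by decide),
        sw_eq_token s i hje hmin "[policy]" "[policy".toList (by decide) (by decide),
        ]
      have htab : pvSectionTable.items = [("[general]", "general"), ("[rule]", "rule"),
     ("[rewrite]", "rewrite"), ("[rewrite_local]", "rewrite"),
     ("[url rewrite]", "url_rewrite"), ("[url_rewrite]", "url_rewrite"),
     ("[header rewrite]", "header_rewrite"), ("[header_rewrite]", "header_rewrite"),
     ("[script]", "script"), ("[mitm]", "mitm"), ("[panel]", "panel"),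
     ("[map local]", "map_local"), ("[map_local]", "map_local"),
     ("[filter]", "filter"), ("[dns]", "dns"), ("[policy]", "policy")] := by rfl
      simp only [PySem.Dict.get?, htab, List.find?, tok_beq, tokeq]
      by_cases c0 : s.toList.take (i + 1) = "[general]".toList
      · simp [c0]
      by_cases c1 : s.toList.take (i + 1) = "[rule]".toList
      · simp [c1]
      by_cases c2 : s.toList.take (i + 1) = "[rewrite]".toList
      · simp [c2]
      by_cases c3 : s.toList.take (i + 1) = "[rewrite_local]".toList
      · simp [c3]
      by_cases c4 : s.toList.take (i + 1) = "[url rewrite]".toList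
      · simp [c4]
      by_cases c5 : s.toList.take (i + 1) = "[url_rewrite]".toList
      · simp [c5]
      by_cases c6 : s.toList.take (i + 1) = "[header rewrite]".toList
      · simp [c6]
      by_cases c7 : s.toList.take (i + 1) = "[header_rewrite]".toList
      · simp [c7]
      by_cases c8 : s.toList.take (i + 1) = "[script]".toList
      · simp [c8]
      by_cases c9 : s.toList.take (i + 1) = "[mitm]".toList
      · simp [c9]
      by_cases c10 : s.toList.take (i + 1) = "[panel]".toList
      · simp [c10]
      by_cases c11 : s.toList.take (i + 1) = "[map local]".toList
      · simp [c11]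
      by_cases c12 : s.toList.take (i + 1) = "[map_local]".toList
      · simp [c12]
      by_cases c13 : s.toList.take (i + 1) = "[filter]".toList
      · simp [c13]
      by_cases c14 : s.toList.take (i + 1) = "[dns]".toList
      · simp [c14]
      by_cases c15 : s.toList.take (i + 1) = "[policy]".toList
      · simp [c15]
      simp at c0 c1 c2 c3 c4 c5 c6 c7 c8 c9 c10 c11 c12 c13 c14 c15
      simp [c0,c1,c2,c3,c4,c5,c6,c7,c8,c9,c10,c11,c12,c13,c14,c15]
  · have h1f : PySem.Str.startswith s "[" = false := by simpa using h1
    rw [if_neg (by rw [h1f]; simp)]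
    simp only [pvScan, pvSectionMarkers, List.any_cons, List.any_nil,
        sw_false_no_bracket s h1f "[general]" (by decide),
        sw_false_no_bracket s h1f "[rule]" (by decide),
        sw_false_no_bracket s h1f "[rewrite]" (by decide),
        sw_false_no_bracket s h1f "[rewrite_local]" (by decide),
        sw_false_no_bracket s h1f "[url rewrite]" (by decide),
        sw_false_no_bracket s h1f "[url_rewrite]" (by decide),
        sw_false_no_bracket s h1f "[header rewrite]" (by decide),
        sw_false_no_bracket s h1f "[header_rewrite]" (by decide),
        sw_false_no_bracket s h1f "[script]" (by decide),
        sw_false_no_bracket s h1f "[mitm]" (by decide),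
        sw_false_no_bracket s h1f "[panel]" (by decide),
        sw_false_no_bracket s h1f "[map local]" (by decide),
        sw_false_no_bracket s h1f "[map_local]" (by decide),
        sw_false_no_bracket s h1f "[filter]" (by decide),
        sw_false_no_bracket s h1f "[dns]" (by decide),
        sw_false_no_bracket s h1f "[policy]" (by decide),
      ]
    simp

-- ===== VERDICT (by name: the statement is the Claim_ definition above) =====
theorem detect_section_py_spec : Claim_equal_detect_section_py := by
  intro line _
  unfold Spec_detect_section_py detect_section_py detect_section_py_alt
  exact core (PySem.Str.lower line)
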